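-- pv_equiv track=rewrite | github.com/pointcarre-app/maths.pm | generate_contrast_matrix.py | generate_adjacency_matrix
-- ===== SOURCE A (Python) =====
-- def generate_adjacency_matrix(foreground_vars, background_vars):
--     matrix = {}  # {(fg, bg): 0/1}
--
--     # Initialize matrix with 0s for all combinations
--     for fg in foreground_vars:
--         for bg in background_vars:
--             matrix[(fg, bg)] = 0
--
--     # Rule 1: -content colors against their corresponding main color
--     # This is important for RGAA 3.3.1 (UI components)
--     for fg in foreground_vars:
--         if "-content" in fg:
--             main_color_name = fg.replace("-content", "")
--             # Ensure the main_color_name is a valid background variable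
--             if main_color_name in background_vars:
--                 if (fg, main_color_name) in matrix:
--                     matrix[(fg, main_color_name)] = 1
--
--     # Rule 2: Specific foreground colors against specific base backgrounds
--     # This covers RGAA 3.2 (text contrast) requirements
--     specific_foregrounds = [
--         "--color-accent",
--         "--color-primary",
--         "--color-secondary",
--         "--color-base-content",
--     ]
--     specific_backgrounds = [
--         "--color-base-100",
--         "--color-base-200",
--         "--color-base-300",
--     ]
--
--     for fg in specific_foregrounds:
--         if fg in foreground_vars:
--             for bg in specific_backgrounds:
--                 if bg in background_vars:
--                     if (fg, bg) in matrix: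
--                         matrix[(fg, bg)] = 1
--
--     # Rule 3: UI component colors against base backgrounds
--     # For RGAA 3.3 compliance (UI components need 3:1 ratio)
--     ui_component_colors = [
--         "--color-error",
--         "--color-warning",
--         "--color-success",
--         "--color-info",
--         "--color-neutral",
--     ]
--
--     for ui_color in ui_component_colors:
--         if ui_color in foreground_vars:
--             for bg in specific_backgrounds:
--                 if bg in background_vars:
--                     if (ui_color, bg) in matrix:
--                         matrix[(ui_color, bg)] = 1
--
--     return matrix
-- ===== SOURCE B (Python) =====
-- HIGHLIGHT_FOREGROUNDS = frozenset([
--     "--color-accent",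
--     "--color-primary",
--     "--color-secondary",
--     "--color-base-content",
--     "--color-error",
--     "--color-warning",
--     "--color-success",
--     "--color-info",
--     "--color-neutral",
-- ])
--
-- BASE_BACKGROUNDS = frozenset([
--     "--color-base-100",
--     "--color-base-200",
--     "--color-base-300",
-- ])
--
--
-- def generate_adjacency_matrix(foreground_vars, background_vars):
--     # Single row-major pass: classify each foreground once, then decide every
--     # cell of its row locally -- no zero-initialised matrix, no rule passes.
--     matrix = {}
--     for fg in foreground_vars:
--         content_match = fg.replace("-content", "") if "-content" in fg else None
--         highlight = fg in HIGHLIGHT_FOREGROUNDS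
--         for bg in background_vars:
--             if bg == content_match or (highlight and bg in BASE_BACKGROUNDS):
--                 matrix[(fg, bg)] = 1
--             else:
--                 matrix[(fg, bg)] = 0
--     return matrix
-- ===== Notes on version B (the rewrite author's own statement) =====
-- stated objective: alternative
-- what changed: A materialises a mutable all-zero matrix and then runs three global rule passes that overwrite chosen cells to 1 (with membership and cell-existence checks against the dict); B never initialises or revisits the matrix: one row-major pass classifies each foreground once (its '-content' partner and highlight-set membership) and decides every cell of its row locally from that classification, writing each cell exactly once; this is correct because inside the iteration fg is always in foreground_vars and bg in background_vars, making A's global checks redundant per cell.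
import Mathlib
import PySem

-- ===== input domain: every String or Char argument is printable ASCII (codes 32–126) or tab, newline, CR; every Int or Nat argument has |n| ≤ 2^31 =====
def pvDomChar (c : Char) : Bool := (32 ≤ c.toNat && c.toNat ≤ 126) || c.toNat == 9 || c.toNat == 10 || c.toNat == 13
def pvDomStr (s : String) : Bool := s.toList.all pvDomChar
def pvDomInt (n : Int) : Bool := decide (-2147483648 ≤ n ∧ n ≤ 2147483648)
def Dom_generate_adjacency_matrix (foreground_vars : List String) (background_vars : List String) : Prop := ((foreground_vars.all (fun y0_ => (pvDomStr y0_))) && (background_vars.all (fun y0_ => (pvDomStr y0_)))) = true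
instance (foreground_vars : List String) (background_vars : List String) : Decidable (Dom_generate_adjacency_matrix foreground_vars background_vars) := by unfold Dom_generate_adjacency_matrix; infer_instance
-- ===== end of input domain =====

-- B replaces A's mutable all-zero matrix plus three rule passes by a stateless local
-- predicate deciding each cell from (fg, bg) alone, applied in one comprehension
-- (objective: alternative decomposition, same asymptotic cost).

-- ===== PORT A =====
def pvSpecificForegroundsA : List String :=
  ["--color-accent", "--color-primary", "--color-secondary", "--color-base-content"]
def pvSpecificBackgroundsA : List String :=
  ["--color-base-100", "--color-base-200", "--color-base-300"]
def pvUiComponentColorsA : List String :=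
  ["--color-error", "--color-warning", "--color-success", "--color-info", "--color-neutral"]

def generate_adjacency_matrix (foreground_vars : List String) (background_vars : List String) : List (String × String × Int) :=
  -- matrix = {}; init with 0s
  let m0 : PySem.Dict (String × String) Int :=
    foreground_vars.foldl (fun m fg =>
      background_vars.foldl (fun m bg => m.insert (fg, bg) 0) m) PySem.Dict.empty
  -- Rule 1: -content colors against their corresponding main color
  let m1 :=
    foreground_vars.foldl (fun m fg =>
      if PySem.Str.isIn "-content" fg then
        let main_color_name := PySem.Str.replace fg "-content" ""
        if background_vars.contains main_color_name then
          (if m.contains (fg, main_color_name) then m.insert (fg, main_color_name) 1 else m)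
        else m
      else m) m0
  -- Rule 2: specific foregrounds against specific base backgrounds
  let m2 :=
    pvSpecificForegroundsA.foldl (fun m fg =>
      if foreground_vars.contains fg then
        pvSpecificBackgroundsA.foldl (fun m bg =>
          if background_vars.contains bg then
            (if m.contains (fg, bg) then m.insert (fg, bg) 1 else m)
          else m) m
      else m) m1
  -- Rule 3: UI component colors against base backgrounds
  let m3 :=
    pvUiComponentColorsA.foldl (fun m fg =>
      if foreground_vars.contains fg then
        pvSpecificBackgroundsA.foldl (fun m bg =>
          if background_vars.contains bg then
            (if m.contains (fg, bg) then m.insert (fg, bg) 1 else m)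
          else m) m
      else m) m2
  m3.items.map (fun p => (p.1.1, p.1.2, p.2))

-- ===== PORT B =====
def pvHighlightForegroundsB : List String :=
  ["--color-accent", "--color-primary", "--color-secondary", "--color-base-content",
   "--color-error", "--color-warning", "--color-success", "--color-info", "--color-neutral"]
def pvBaseBackgroundsB : List String :=
  ["--color-base-100", "--color-base-200", "--color-base-300"]

def generate_adjacency_matrix_alt (foreground_vars : List String) (background_vars : List String) : List (String × String × Int) :=
  -- single row-major pass: classify fg once, then decide each cell of its row locally
  let matrix : PySem.Dict (String × String) Int :=
    foreground_vars.foldl (fun m fg =>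
      let content_match : Option String :=
        if PySem.Str.isIn "-content" fg then some (PySem.Str.replace fg "-content" "") else none
      let highlight : Bool := pvHighlightForegroundsB.contains fg
      background_vars.foldl (fun m bg =>
        if (content_match == some bg) || (highlight && pvBaseBackgroundsB.contains bg) then
          m.insert (fg, bg) 1
        else
          m.insert (fg, bg) 0) m) PySem.Dict.empty
  matrix.items.map (fun p => (p.1.1, p.1.2, p.2))

-- ===== PRECONDITION & SPEC =====
def Spec_generate_adjacency_matrix (foreground_vars : List String) (background_vars : List String) (out : List (String × String × Int)) : Prop := out = generate_adjacency_matrix_alt foreground_vars background_vars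
instance (foreground_vars : List String) (background_vars : List String) (out : List (String × String × Int)) : Decidable (Spec_generate_adjacency_matrix foreground_vars background_vars out) := by unfold Spec_generate_adjacency_matrix; infer_instance

-- ===== CLAIM (what is proved, stated in full; the proofs are below) =====
def Claim_equal_generate_adjacency_matrix : Prop := ∀ (foreground_vars : List String) (background_vars : List String), Dom_generate_adjacency_matrix foreground_vars background_vars → Spec_generate_adjacency_matrix foreground_vars background_vars (generate_adjacency_matrix foreground_vars background_vars)

-- ===== LEMMAS AND PROOFS =====

-- pointwise-equal fold bodies give equal folds
theorem pv_foldl_congr {α β : Type} (L : List α) (f g : β → α → β) (b : β)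
    (h : ∀ m, ∀ x ∈ L, f m x = g m x) : L.foldl f b = L.foldl g b := by
  induction L generalizing b with
  | nil => rfl
  | cons x L ih =>
      rw [List.foldl_cons, List.foldl_cons, h b x (List.mem_cons_self ..)]
      exact ih _ (fun m y hy => h m y (List.mem_cons_of_mem _ hy))

-- a guarded fold over elements whose guard is everywhere false does nothing
theorem pv_noop {β γ : Type} (g : β → Bool) (t : γ → β → γ) (L : List β) (d : γ)
    (h : ∀ k ∈ L, g k = false) :
    L.foldl (fun m k => if g k then t m k else m) d = d := by
  induction L generalizing d with
  | nil => rfl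
  | cons b L ih =>
      simp only [List.foldl_cons, h b (List.mem_cons_self ..)]
      exact ih d (fun k hk => h k (List.mem_cons_of_mem _ hk))

-- the keys of a dict whose items are tabulated over S are S itself
theorem pv_keys_of_items {d : PySem.Dict (String × String) Int} {S : List (String × String)}
    {f : (String × String) → Int} (h : d.items = S.map (fun k => (k, f k))) :
    d.keys = S := by
  show d.items.map (·.1) = S
  rw [h, List.map_map]
  have hcomp : ((fun p : (String × String) × Int => p.1) ∘ fun k : String × String => (k, f k)) = id :=
    funext (fun _ => rfl)
  rw [hcomp, List.map_id]

-- tabulating fold: inserting (k, f k) over a pair list extends the tabulated shape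
theorem pv_tab (pairs : List (String × String)) (f : (String × String) → Int)
    (d : PySem.Dict (String × String) Int) (S : List (String × String))
    (h : d.items = S.map (fun k => (k, f k))) :
    (pairs.foldl (fun m k => m.insert k (f k)) d).items
      = (PySem.Set.update S pairs).map (fun k => (k, f k)) := by
  induction pairs generalizing d S with
  | nil => exact h
  | cons k ps ih =>
      have hkeys : d.keys = S := pv_keys_of_items h
      have hc : d.contains k = decide (k ∈ S) := by
        rw [PySem.Dict.contains_eq_decide_mem_keys, hkeys]
      by_cases hk : k ∈ S
      · have hstep : (d.insert k (f k)).items = (PySem.Set.add S k).map (fun j => (j, f j)) := by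
          rw [PySem.Dict.items_insert_of_contains d (f k) (by simp [hc, hk]), h, List.map_map]
          have hadd : PySem.Set.add S k = S := by
            simp [PySem.Set.add, PySem.Set.contains, hk]
          rw [hadd]
          refine List.map_congr_left (fun j _ => ?_)
          by_cases hj : j = k
          · subst hj; simp
          · simp [Function.comp, hj, beq_iff_eq]
        have : PySem.Set.update S (k :: ps) = PySem.Set.update (PySem.Set.add S k) ps := rfl
        rw [List.foldl_cons, this]
        exact ih _ _ hstep
      · have hstep : (d.insert k (f k)).items = (PySem.Set.add S k).map (fun j => (j, f j)) := by
          rw [PySem.Dict.items_insert_of_not_contains d (f k) (by simp [hc, hk]), h]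
          have hadd : PySem.Set.add S k = S ++ [k] := by
            simp [PySem.Set.add, PySem.Set.contains, hk]
          rw [hadd, List.map_append]
          rfl
        rw [List.foldl_cons]
        exact ih _ _ hstep

-- marking fold: guarded overwrite-with-1 at existing keys turns tabulated values into 1 exactly
-- at the keys hit by the guard
theorem pv_mark (g : (String × String) → Bool) (U : List (String × String))
    (d : PySem.Dict (String × String) Int) (S : List (String × String))
    (f : (String × String) → Int) (h : d.items = S.map (fun k => (k, f k))) :
    (U.foldl (fun m k => if g k then (if m.contains k then m.insert k 1 else m) else m) d).items
      = S.map (fun k => (k, if U.any (fun u => g u && u == k) then 1 else f k)) := by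
  induction U generalizing d f with
  | nil => simpa using h
  | cons u U ih =>
      have hkeys : d.keys = S := pv_keys_of_items h
      have hc : d.contains u = decide (u ∈ S) := by
        rw [PySem.Dict.contains_eq_decide_mem_keys, hkeys]
      have hstep : (if g u then (if d.contains u then d.insert u 1 else d) else d).items
          = S.map (fun k => (k, if g u && u == k then 1 else f k)) := by
        by_cases hg : g u = true
        · by_cases hu : u ∈ S
          · rw [hg, if_pos rfl, if_pos (by simp [hc, hu]),
              PySem.Dict.items_insert_of_contains d 1 (by simp [hc, hu]), h, List.map_map]
            refine List.map_congr_left (fun j _ => ?_)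
            by_cases hj : j = u
            · subst hj; simp
            · simp [Function.comp, hj, beq_iff_eq, Ne.symm hj]
          · rw [hg, if_pos rfl, if_neg (by simp [hc, hu]), h]
            refine List.map_congr_left (fun j hj => ?_)
            have : ¬ (u = j) := fun he => hu (he ▸ hj)
            simp [beq_iff_eq, this]
        · rw [if_neg hg, h]
          refine List.map_congr_left (fun j _ => ?_)
          simp only [Prod.mk.injEq, true_and]
          rw [if_neg]
          simp [hg]
      rw [List.foldl_cons, ih _ _ hstep]
      refine List.map_congr_left (fun k _ => ?_)
      by_cases hU : U.any (fun v => g v && v == k) = true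
      · simp [hU, List.any_cons]
      · by_cases hu : (g u && u == k) = true <;>
          simp [List.any_cons, hU, hu]

-- nested insert fold = fold over the flattened product list
theorem pv_nested_insert (fgs bgs : List String) (f : (String × String) → Int)
    (d : PySem.Dict (String × String) Int) :
    fgs.foldl (fun m fg => bgs.foldl (fun m bg => m.insert (fg, bg) (f (fg, bg))) m) d
      = (fgs.flatMap (fun fg => bgs.map (fun bg => (fg, bg)))).foldl
          (fun m k => m.insert k (f k)) d := by
  rw [List.foldl_flatMap]
  refine pv_foldl_congr _ _ _ _ (fun m fg _ => ?_)
  rw [List.foldl_map]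

-- B's per-cell value, the let-expanded row condition
def pvBVal (fg : String) (bg : String) : Int :=
  if ((if PySem.Str.isIn "-content" fg then some (PySem.Str.replace fg "-content" "") else none) == some bg)
      || (pvHighlightForegroundsB.contains fg && pvBaseBackgroundsB.contains bg) then 1 else 0

-- ===== assembled facts about the two programs =====

def pvG1 (bgs : List String) (k : String × String) : Bool :=
  PySem.Str.isIn "-content" k.1 && bgs.contains k.2

def pvG23 (fgs bgs : List String) (k : String × String) : Bool :=
  fgs.contains k.1 && bgs.contains k.2

def pvU1 (fgs : List String) : List (String × String) :=
  fgs.map (fun fg => (fg, PySem.Str.replace fg "-content" ""))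

def pvU23 : List (String × String) :=
  (pvSpecificForegroundsA ++ pvUiComponentColorsA).flatMap
    (fun fg => pvSpecificBackgroundsA.map (fun bg => (fg, bg)))

-- A's rule-1 fold is the marking fold over pvU1 with guard pvG1
theorem pv_rule1_shape (fgs bgs : List String) (d : PySem.Dict (String × String) Int) :
    fgs.foldl (fun m fg =>
      if PySem.Str.isIn "-content" fg then
        let main_color_name := PySem.Str.replace fg "-content" ""
        if bgs.contains main_color_name then
          (if m.contains (fg, main_color_name) then m.insert (fg, main_color_name) 1 else m)
        else m
      else m) d
    = (pvU1 fgs).foldl (fun m k =>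
        if pvG1 bgs k then (if m.contains k then m.insert k 1 else m) else m) d := by
  rw [pvU1, List.foldl_map]
  refine pv_foldl_congr _ _ _ _ (fun m fg _ => ?_)
  by_cases h1 : PySem.Str.isIn "-content" fg <;>
    by_cases h2 : bgs.contains (PySem.Str.replace fg "-content" "") <;>
      simp only [pvG1, h1, h2, Bool.and_true, Bool.and_false,
        Bool.false_eq_true, if_true, if_false]

-- A's rule-2 and rule-3 folds combine into the marking fold over pvU23 with guard pvG23
theorem pv_rule23_shape (fgs bgs : List String) (d : PySem.Dict (String × String) Int) :
    pvUiComponentColorsA.foldl (fun m fg =>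
      if fgs.contains fg then
        pvSpecificBackgroundsA.foldl (fun m bg =>
          if bgs.contains bg then
            (if m.contains (fg, bg) then m.insert (fg, bg) 1 else m)
          else m) m
      else m)
      (pvSpecificForegroundsA.foldl (fun m fg =>
        if fgs.contains fg then
          pvSpecificBackgroundsA.foldl (fun m bg =>
            if bgs.contains bg then
              (if m.contains (fg, bg) then m.insert (fg, bg) 1 else m)
            else m) m
        else m) d)
    = pvU23.foldl (fun m k =>
        if pvG23 fgs bgs k then (if m.contains k then m.insert k 1 else m) else m) d := by
  rw [← List.foldl_append, pvU23, List.foldl_flatMap]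
  refine pv_foldl_congr _ _ _ _ (fun m fg _ => ?_)
  rw [List.foldl_map]
  by_cases hf : fgs.contains fg = true
  · rw [if_pos hf]
    refine pv_foldl_congr _ _ _ _ (fun m' bg _ => ?_)
    by_cases h2 : bgs.contains bg <;>
      simp only [pvG23, hf, h2, Bool.and_true, Bool.and_false,
        Bool.false_eq_true, if_true, if_false]
  · rw [if_neg hf]
    exact (pv_noop _ _ _ _ (fun bg _ => by
      simp only [pvG23]
      rw [Bool.eq_false_iff]
      intro hand
      exact hf ((Bool.and_eq_true ..).mp hand).1)).symm

-- the key list both matrices are tabulated over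
def pvAllPairs (fgs bgs : List String) : List (String × String) :=
  fgs.flatMap (fun fg => bgs.map (fun bg => (fg, bg)))

theorem pv_mark_any_iff (g : (String × String) → Bool) (U : List (String × String))
    (k : String × String) :
    U.any (fun u => g u && u == k) = true ↔ ∃ u ∈ U, g u = true ∧ u = k := by
  simp [List.any_eq_true, beq_iff_eq]

-- A's cell-value function after the two marking folds
def pvF1 (fgs bgs : List String) (k : String × String) : Int :=
  if (pvU1 fgs).any (fun u => pvG1 bgs u && u == k) then 1 else 0

def pvF3 (fgs bgs : List String) (k : String × String) : Int :=
  if pvU23.any (fun u => pvG23 fgs bgs u && u == k) then 1 else pvF1 fgs bgs k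

-- on every actual cell (fg ∈ fgs, bg ∈ bgs) A's accumulated value is B's local predicate
theorem pv_values_agree (fgs bgs : List String) (k : String × String)
    (hf : k.1 ∈ fgs) (hb : k.2 ∈ bgs) :
    pvF3 fgs bgs k = pvBVal k.1 k.2 := by
  have hany1 : ((pvU1 fgs).any (fun u => pvG1 bgs u && u == k) = true) ↔
      (PySem.Str.isIn "-content" k.1 && (PySem.Str.replace k.1 "-content" "" == k.2)) = true := by
    rw [pv_mark_any_iff]
    simp only [pvU1, pvG1, List.mem_map, Bool.and_eq_true, beq_iff_eq]
    constructor
    · rintro ⟨u, ⟨fg, hfg, rfl⟩, ⟨h1, _⟩, rfl⟩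
      exact ⟨h1, rfl⟩
    · rintro ⟨h1, h2⟩
      refine ⟨(k.1, PySem.Str.replace k.1 "-content" ""), ⟨k.1, hf, rfl⟩, ⟨h1, ?_⟩, ?_⟩
      · simpa [h2] using (List.contains_iff_mem).mpr hb
      · rw [h2]
  have hlists : pvSpecificForegroundsA ++ pvUiComponentColorsA = pvHighlightForegroundsB := by
    decide
  have hlists2 : pvSpecificBackgroundsA = pvBaseBackgroundsB := by decide
  have hany23 : (pvU23.any (fun u => pvG23 fgs bgs u && u == k) = true) ↔
      (pvHighlightForegroundsB.contains k.1 && pvBaseBackgroundsB.contains k.2) = true := by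
    rw [pv_mark_any_iff]
    simp only [pvU23, hlists, hlists2, List.mem_flatMap, List.mem_map, pvG23,
      Bool.and_eq_true, List.contains_iff_mem]
    constructor
    · rintro ⟨u, ⟨fg, hfg, bg, hbg, rfl⟩, _, rfl⟩
      exact ⟨hfg, hbg⟩
    · rintro ⟨h1, h2⟩
      exact ⟨k, ⟨k.1, h1, k.2, h2, rfl⟩, ⟨hf, hb⟩, rfl⟩
  have e1 : ((pvU1 fgs).any (fun u => pvG1 bgs u && u == k))
      = (PySem.Str.isIn "-content" k.1 && (PySem.Str.replace k.1 "-content" "" == k.2)) :=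
    Bool.eq_iff_iff.mpr (by simpa using hany1)
  have e23 : (pvU23.any (fun u => pvG23 fgs bgs u && u == k))
      = (pvHighlightForegroundsB.contains k.1 && pvBaseBackgroundsB.contains k.2) :=
    Bool.eq_iff_iff.mpr (by simpa using hany23)
  have ec : ((if PySem.Str.isIn "-content" k.1 then some (PySem.Str.replace k.1 "-content" "") else none) == some k.2)
      = (PySem.Str.isIn "-content" k.1 && (PySem.Str.replace k.1 "-content" "" == k.2)) := by
    by_cases h : PySem.Str.isIn "-content" k.1 = true
    · rw [if_pos h, h, Bool.true_and]
      rfl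
    · have h' : PySem.Str.isIn "-content" k.1 = false := Bool.eq_false_iff.mpr h
      rw [if_neg h, h', Bool.false_and]
      rfl
  unfold pvF3 pvF1 pvBVal
  rw [e1, e23, ec]
  by_cases h1 : (PySem.Str.isIn "-content" k.1 && (PySem.Str.replace k.1 "-content" "" == k.2)) = true <;>
    by_cases h2 : (pvHighlightForegroundsB.contains k.1 && pvBaseBackgroundsB.contains k.2) = true
  · rw [if_pos h2, if_pos (Bool.or_eq_true_iff.mpr (Or.inl h1))]
  · rw [if_neg h2, if_pos h1, if_pos (Bool.or_eq_true_iff.mpr (Or.inl h1))]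
  · rw [if_pos h2, if_pos (Bool.or_eq_true_iff.mpr (Or.inr h2))]
  · rw [if_neg h2, if_neg h1,
      if_neg (fun hor => (Bool.or_eq_true_iff.mp hor).elim h1 h2)]

-- item lists of the two ports, both tabulated over the same key list
set_option maxHeartbeats 2000000 in
theorem pv_items_A (fgs bgs : List String) :
    generate_adjacency_matrix fgs bgs
      = ((PySem.Set.update [] (pvAllPairs fgs bgs)).map
          (fun k => (k, pvF3 fgs bgs k))).map (fun p => (p.1.1, p.1.2, p.2)) := by
  have hdef : generate_adjacency_matrix fgs bgs = ((pvUiComponentColorsA.foldl (fun m fg =>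
      if fgs.contains fg then
        pvSpecificBackgroundsA.foldl (fun m bg =>
          if bgs.contains bg then
            (if m.contains (fg, bg) then m.insert (fg, bg) 1 else m)
          else m) m
      else m)
      (pvSpecificForegroundsA.foldl (fun m fg =>
        if fgs.contains fg then
          pvSpecificBackgroundsA.foldl (fun m bg =>
            if bgs.contains bg then
              (if m.contains (fg, bg) then m.insert (fg, bg) 1 else m)
            else m) m
        else m)
        (fgs.foldl (fun m fg =>
          if PySem.Str.isIn "-content" fg then
            let main_color_name := PySem.Str.replace fg "-content" ""
            if bgs.contains main_color_name then
              (if m.contains (fg, main_color_name) then m.insert (fg, main_color_name) 1 else m)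
            else m
          else m)
          (fgs.foldl (fun m fg =>
            bgs.foldl (fun m bg => m.insert (fg, bg) 0) m)
            (PySem.Dict.empty : PySem.Dict (String × String) Int))))).items).map
      (fun p => (p.1.1, p.1.2, p.2)) := rfl
  rw [hdef]
  congr 1
  rw [pv_rule23_shape, pv_rule1_shape,
    pv_nested_insert fgs bgs (fun _ => (0 : Int))]
  have h0 : ((fgs.flatMap (fun fg => bgs.map (fun bg => (fg, bg)))).foldl
      (fun m k => m.insert k ((fun _ => (0 : Int)) k)) PySem.Dict.empty).items
      = (PySem.Set.update [] (pvAllPairs fgs bgs)).map (fun k => (k, (fun _ => (0 : Int)) k)) :=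
    pv_tab _ _ _ [] rfl
  have h1 := pv_mark (pvG1 bgs) (pvU1 fgs) _ _ _ h0
  have h3 := pv_mark (pvG23 fgs bgs) pvU23 _ _ _ h1
  rw [h3]
  rfl

theorem pv_items_B (fgs bgs : List String) :
    generate_adjacency_matrix_alt fgs bgs
      = ((PySem.Set.update [] (pvAllPairs fgs bgs)).map
          (fun k => (k, pvBVal k.1 k.2))).map
          (fun p => (p.1.1, p.1.2, p.2)) := by
  have hdef : generate_adjacency_matrix_alt fgs bgs = ((fgs.foldl (fun m fg =>
      bgs.foldl (fun m bg =>
        if ((if PySem.Str.isIn "-content" fg then some (PySem.Str.replace fg "-content" "") else none) == some bg)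
            || (pvHighlightForegroundsB.contains fg && pvBaseBackgroundsB.contains bg) then
          m.insert (fg, bg) 1
        else
          m.insert (fg, bg) 0) m)
      (PySem.Dict.empty : PySem.Dict (String × String) Int)).items).map
        (fun p => (p.1.1, p.1.2, p.2)) := rfl
  rw [hdef]
  congr 1
  have hmerge : (fgs.foldl (fun m fg =>
      bgs.foldl (fun m bg =>
        if ((if PySem.Str.isIn "-content" fg then some (PySem.Str.replace fg "-content" "") else none) == some bg)
            || (pvHighlightForegroundsB.contains fg && pvBaseBackgroundsB.contains bg) then
          m.insert (fg, bg) 1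
        else
          m.insert (fg, bg) 0) m)
      (PySem.Dict.empty : PySem.Dict (String × String) Int))
      = fgs.foldl (fun m fg => bgs.foldl (fun m bg => m.insert (fg, bg) (pvBVal fg bg)) m)
          PySem.Dict.empty := by
    refine pv_foldl_congr _ _ _ _ (fun m fg _ => ?_)
    refine pv_foldl_congr _ _ _ _ (fun m' bg _ => ?_)
    unfold pvBVal
    exact (apply_ite (m'.insert (fg, bg)) _ 1 0).symm
  rw [hmerge, pv_nested_insert fgs bgs (fun k => pvBVal k.1 k.2)]
  exact pv_tab _ _ _ [] rfl

-- a key of the tabulation list is an actual cell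
theorem pv_mem_allPairs (fgs bgs : List String) (k : String × String)
    (h : k ∈ PySem.Set.update [] (pvAllPairs fgs bgs)) : k.1 ∈ fgs ∧ k.2 ∈ bgs := by
  have h' : k ∈ pvAllPairs fgs bgs := by
    have := (PySem.Set.mem_update [] (pvAllPairs fgs bgs) k).mp h
    simpa using this
  simp only [pvAllPairs, List.mem_flatMap, List.mem_map] at h'
  rcases h' with ⟨fg, hfg, bg, hbg, rfl⟩
  exact ⟨hfg, hbg⟩

-- ===== VERDICT (by name: the statement is the Claim_ definition above) =====
theorem generate_adjacency_matrix_spec : Claim_equal_generate_adjacency_matrix := by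
  intro fgs bgs _
  show generate_adjacency_matrix fgs bgs = generate_adjacency_matrix_alt fgs bgs
  rw [pv_items_A, pv_items_B]
  refine congrArg _ ?_
  refine List.map_congr_left (fun k hk => ?_)
  rcases pv_mem_allPairs fgs bgs k hk with ⟨hf, hb⟩
  exact congrArg (Prod.mk k) (pv_values_agree fgs bgs k hf hb)
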